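-- pv_equiv track=rewrite | github.com/pwn1/mrcpsp-heuristics | justification.py | _latest_feasible_start
-- ===== SOURCE A (Python) =====
-- def _fits(profile, caps, start, duration, demands) -> bool:
--     for t in range(start, start + duration):
--         for r, d in enumerate(demands):
--             if profile[r][t] + d > caps[r]:
--                 return False
--     return True
--
-- def _latest_feasible_start(profile, caps, duration, demands,
--                            lb: int, ub: int) -> int:
--     """Largest t in [lb, ub] where activity (duration, demands) fits. ub is
--     inclusive. Caller guarantees at least one feasible t exists (lb always is)."""
--     if duration == 0:
--         return ub
--     for t in range(ub, lb - 1, -1):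
--         if _fits(profile, caps, t, duration, demands):
--             return t
--     return lb
-- ===== SOURCE B (Python) =====
-- def _latest_feasible_start(profile, caps, duration, demands,
--                            lb: int, ub: int) -> int:
--     """Largest t in [lb, ub] where activity (duration, demands) fits. ub is
--     inclusive. Caller guarantees at least one feasible t exists (lb always is)."""
--     if duration == 0:
--         return ub
--     if ub < lb:
--         return lb
--
--     def blocked(t):
--         # slot t cannot host the activity: some resource would exceed its capacity
--         return any(profile[r][t] + d > caps[r] for r, d in enumerate(demands))
--
--     # nb = smallest blocked slot index >= the current scan position (None if none seen)
--     nb = None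
--     for t in range(ub + duration - 1, ub, -1):   # tail of the highest window
--         if blocked(t):
--             nb = t
--     for s in range(ub, lb - 1, -1):              # each slot inspected exactly once
--         if blocked(s):
--             nb = s
--         if nb is None or nb >= s + duration:
--             return s
--     return lb
-- ===== Notes on version B (the rewrite author's own statement) =====
-- stated objective: alternative
-- what changed: Instead of re-testing the whole duration-long window for every candidate start (nested scans), B computes each time slot's blocked flag exactly once while scanning downward and maintains the nearest blocked slot, deciding each start in O(R).
-- outside the precondition, e.g. on _latest_feasible_start([[10]], [0], 2, [1], 0, 0): A returns 0, B raises IndexError; on _latest_feasible_start([[5]], [0], -2, [1], 0, 1): A returns 1, B raises IndexError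
import Mathlib
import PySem

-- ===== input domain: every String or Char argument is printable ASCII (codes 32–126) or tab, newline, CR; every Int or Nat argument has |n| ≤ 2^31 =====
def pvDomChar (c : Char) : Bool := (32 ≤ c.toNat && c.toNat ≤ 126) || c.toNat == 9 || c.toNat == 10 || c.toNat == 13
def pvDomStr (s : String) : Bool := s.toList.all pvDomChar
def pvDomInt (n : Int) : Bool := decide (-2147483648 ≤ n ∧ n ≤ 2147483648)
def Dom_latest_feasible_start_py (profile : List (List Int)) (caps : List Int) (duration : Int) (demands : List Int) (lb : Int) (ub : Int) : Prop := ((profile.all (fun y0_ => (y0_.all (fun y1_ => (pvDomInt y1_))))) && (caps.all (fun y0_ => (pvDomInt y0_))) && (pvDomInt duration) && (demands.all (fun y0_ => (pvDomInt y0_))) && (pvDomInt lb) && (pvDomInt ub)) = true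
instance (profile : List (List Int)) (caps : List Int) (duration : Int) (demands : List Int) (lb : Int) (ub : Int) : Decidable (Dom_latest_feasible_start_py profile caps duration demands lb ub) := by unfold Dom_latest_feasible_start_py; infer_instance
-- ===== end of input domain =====

-- B computes each slot's blocked flag once while scanning downward (nearest-blocked-slot sweep)
-- instead of re-testing the whole duration-long window for every candidate start.


-- ===== PORT A =====
-- profile[r][t] + d > caps[r]; indexing totalised with getD (Pre_ keeps every access in range)
def pvOver (profile : List (List Int)) (caps : List Int) (t : Int) (rd : Int × Int) : Bool :=
  decide (PySem.List.pyGetD (PySem.List.pyGetD profile rd.1 []) t 0 + rd.2 >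
          PySem.List.pyGetD caps rd.1 0)

-- _fits: for t in range(start, start+duration): for r,d in enumerate(demands): if over: return False; return True
def pvFits (profile : List (List Int)) (caps : List Int) (start : Int) (duration : Int)
    (demands : List Int) : Bool :=
  (PySem.List.pyRange start (start + duration) 1).all fun t =>
    (PySem.List.enumerate demands 0).all fun rd => !pvOver profile caps t rd

-- for t in range(ub, lb-1, -1): if _fits(...): return t; return lb
def pvLoopA (profile : List (List Int)) (caps : List Int) (duration : Int) (demands : List Int)
    (lb : Int) : List Int → Int
  | [] => lb
  | t :: ts =>
      if pvFits profile caps t duration demands then t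
      else pvLoopA profile caps duration demands lb ts

def latest_feasible_start_py (profile : List (List Int)) (caps : List Int) (duration : Int)
    (demands : List Int) (lb : Int) (ub : Int) : Int :=
  if duration = 0 then ub
  else pvLoopA profile caps duration demands lb (PySem.List.pyRange ub (lb - 1) (-1))

-- ===== PORT B =====
-- blocked(t) = any(profile[r][t] + d > caps[r] for r,d in enumerate(demands))
def pvBlocked (profile : List (List Int)) (caps : List Int) (demands : List Int) (t : Int) : Bool :=
  (PySem.List.enumerate demands 0).any fun rd => pvOver profile caps t rd

-- one update step: if blocked(t): nb = t
def pvStep (profile : List (List Int)) (caps : List Int) (demands : List Int)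
    (nb : Option Int) (t : Int) : Option Int :=
  if pvBlocked profile caps demands t then some t else nb

-- for s in range(ub, lb-1, -1): if blocked(s): nb = s; if nb is None or nb >= s+duration: return s; return lb
def pvLoopB (profile : List (List Int)) (caps : List Int) (duration : Int) (demands : List Int)
    (lb : Int) : List Int → Option Int → Int
  | [], _ => lb
  | s :: ss, nb =>
      let nb' := pvStep profile caps demands nb s
      if (match nb' with | none => true | some m => decide (s + duration ≤ m)) then s
      else pvLoopB profile caps duration demands lb ss nb'

def latest_feasible_start_py_alt (profile : List (List Int)) (caps : List Int) (duration : Int)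
    (demands : List Int) (lb : Int) (ub : Int) : Int :=
  if duration = 0 then ub
  else if ub < lb then lb
  else
    let nb0 := (PySem.List.pyRange (ub + duration - 1) ub (-1)).foldl
      (pvStep profile caps demands) none
    pvLoopB profile caps duration demands lb (PySem.List.pyRange ub (lb - 1) (-1)) nb0

-- ===== PRECONDITION & SPEC =====
-- Pre_ asks that every slot index the sweep touches be in range (A's early exit can return
-- a value before reaching an out-of-range index that makes B raise); for negative durations
-- (a vacuous window) only slot ub is touched by B, so only it must be in range.
def Pre_latest_feasible_start_py (profile : List (List Int)) (caps : List Int) (duration : Int) (demands : List Int) (lb : Int) (ub : Int) : Prop :=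
  duration = 0 ∨ ub < lb ∨
  (duration < 0 ∧ demands.length ≤ profile.length ∧ demands.length ≤ caps.length ∧
    ∀ r < demands.length,
      -(((profile.getD r []).length : Int)) ≤ ub ∧ ub < ((profile.getD r []).length : Int)) ∨
  (0 < duration ∧ demands.length ≤ profile.length ∧ demands.length ≤ caps.length ∧
    ∀ r < demands.length,
      -(((profile.getD r []).length : Int)) ≤ lb ∧
      ub + duration ≤ ((profile.getD r []).length : Int))
instance (profile : List (List Int)) (caps : List Int) (duration : Int) (demands : List Int) (lb : Int) (ub : Int) : Decidable (Pre_latest_feasible_start_py profile caps duration demands lb ub) := by unfold Pre_latest_feasible_start_py; infer_instance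

def pvWitness_latest_feasible_start_py : List (List Int) × List Int × Int × List Int × Int × Int :=
  ([[1, 3, 0, 2], [0, 0, 2, 0]], [3, 2], 2, [1, 1], 0, 2)

def Spec_latest_feasible_start_py (profile : List (List Int)) (caps : List Int) (duration : Int) (demands : List Int) (lb : Int) (ub : Int) (out : Int) : Prop := out = latest_feasible_start_py_alt profile caps duration demands lb ub
instance (profile : List (List Int)) (caps : List Int) (duration : Int) (demands : List Int) (lb : Int) (ub : Int) (out : Int) : Decidable (Spec_latest_feasible_start_py profile caps duration demands lb ub out) := by unfold Spec_latest_feasible_start_py; infer_instance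

-- ===== CLAIM (what is proved, stated in full; the proofs are below) =====
def Claim_equal_latest_feasible_start_py : Prop := ∀ (profile : List (List Int)) (caps : List Int) (duration : Int) (demands : List Int) (lb : Int) (ub : Int), Dom_latest_feasible_start_py profile caps duration demands lb ub → Pre_latest_feasible_start_py profile caps duration demands lb ub → Spec_latest_feasible_start_py profile caps duration demands lb ub (latest_feasible_start_py profile caps duration demands lb ub)

-- ===== LEMMAS AND PROOFS =====

-- nb is the least blocked slot in [lo, hi), or none if that interval has no blocked slot
def pvNear (profile : List (List Int)) (caps : List Int) (demands : List Int)
    (lo hi : Int) (nb : Option Int) : Prop :=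
  (nb = none ∧ ∀ t, lo ≤ t → t < hi → pvBlocked profile caps demands t = false) ∨
  (∃ m, nb = some m ∧ lo ≤ m ∧ m < hi ∧ pvBlocked profile caps demands m = true ∧
    ∀ t, lo ≤ t → t < m → pvBlocked profile caps demands t = false)

-- the countdown list [a, a-1, …, a-n+1]
def pvDesc (a : Int) : Nat → List Int
  | 0 => []
  | n + 1 => a :: pvDesc (a - 1) n

theorem pvDesc_eq_pyRange (n : Nat) : ∀ a : Int, PySem.List.pyRange a (a - n) (-1) = pvDesc a n := by
  induction n with
  | zero =>
      intro a
      simp only [pvDesc, Nat.cast_zero, sub_zero]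
      exact PySem.List.pyRange_neg_one_eq_nil le_rfl
  | succ n ih =>
      intro a
      rw [PySem.List.pyRange_neg_one_cons (by push_cast; omega), pvDesc]
      have := ih (a - 1)
      have h : a - 1 - (n : Int) = a - ((n : Nat) + 1 : Nat) := by push_cast; omega
      rw [h] at this
      rw [this]

theorem pvNear_step (profile : List (List Int)) (caps : List Int) (demands : List Int)
    (s hi : Int) (nb : Option Int) (hs : s < hi)
    (h : pvNear profile caps demands (s + 1) hi nb) :
    pvNear profile caps demands s hi (pvStep profile caps demands nb s) := by
  unfold pvStep
  by_cases hb : pvBlocked profile caps demands s = true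
  · rw [if_pos hb]
    exact Or.inr ⟨s, rfl, le_refl s, hs, hb, fun t h1 h2 => absurd (lt_of_le_of_lt h1 h2) (lt_irrefl s)⟩
  · rw [if_neg hb]
    rcases h with ⟨hnb, hall⟩ | ⟨m, hnb, hlo, hhi, hbm, hall⟩
    · refine Or.inl ⟨hnb, fun t h1 h2 => ?_⟩
      rcases eq_or_lt_of_le h1 with h1 | h1
      · simpa [← h1] using hb
      · exact hall t (by omega) h2
    · refine Or.inr ⟨m, hnb, by omega, hhi, hbm, fun t h1 h2 => ?_⟩
      rcases eq_or_lt_of_le h1 with h1 | h1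
      · simpa [← h1] using hb
      · exact hall t (by omega) h2

theorem pvNear_fold (profile : List (List Int)) (caps : List Int) (demands : List Int)
    (hi : Int) (n : Nat) : ∀ (a : Int) (nb : Option Int), a < hi →
    pvNear profile caps demands (a + 1) hi nb →
    pvNear profile caps demands (a + 1 - n) hi
      ((pvDesc a n).foldl (pvStep profile caps demands) nb) := by
  induction n with
  | zero => intro a nb _ h; simpa using h
  | succ n ih =>
      intro a nb ha h
      have h1 : pvNear profile caps demands a hi (pvStep profile caps demands nb a) :=
        pvNear_step profile caps demands a hi nb ha h
      have h2 := ih (a - 1) (pvStep profile caps demands nb a) (by omega) (by simpa using h1)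
      have he : a - 1 + 1 - (n : Int) = a + 1 - ((n : Nat) + 1 : Nat) := by push_cast; omega
      rw [he] at h2
      simpa [pvDesc, List.foldl_cons] using h2

-- A's window test, characterised pointwise through blocked
theorem pvFits_eq_all (profile : List (List Int)) (caps : List Int) (s duration : Int)
    (demands : List Int) :
    pvFits profile caps s duration demands
      = (PySem.List.pyRange s (s + duration) 1).all
          (fun t => !pvBlocked profile caps demands t) := by
  unfold pvFits pvBlocked
  simp [List.all_eq_not_any_not]

-- main loop equivalence on a countdown list whose windows stay below hi
theorem pvLoop_eq (profile : List (List Int)) (caps : List Int) (duration : Int)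
    (demands : List Int) (lb hi : Int) (hdur : 0 < duration) (n : Nat) :
    ∀ (s : Int) (nb : Option Int), s + duration ≤ hi →
    pvNear profile caps demands (s + 1) hi nb →
    pvLoopB profile caps duration demands lb (pvDesc s n) nb
      = pvLoopA profile caps duration demands lb (pvDesc s n) := by
  induction n with
  | zero => intro s nb _ _; rfl
  | succ n ih =>
      intro s nb hhi h
      have hnear : pvNear profile caps demands s hi (pvStep profile caps demands nb s) :=
        pvNear_step profile caps demands s hi nb (by omega) h
      have hfit : (match pvStep profile caps demands nb s with
          | none => true | some m => decide (s + duration ≤ m))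
          = pvFits profile caps s duration demands := by
        rw [pvFits_eq_all]
        rcases hnear with ⟨hnb, hall⟩ | ⟨m, hnb, hlo, hmhi, hbm, hall⟩
        · rw [hnb]
          symm
          simp only [List.all_eq_true]
          intro t ht
          rw [PySem.List.mem_pyRange_one] at ht
          simp [hall t ht.1 (by omega)]
        · rw [hnb]
          by_cases hc : s + duration ≤ m
          · simp only [hc, decide_true]
            symm
            simp only [List.all_eq_true]
            intro t ht
            rw [PySem.List.mem_pyRange_one] at ht
            simp [hall t ht.1 (by omega)]
          · simp only [hc, decide_false]
            symm
            rw [Bool.eq_false_iff]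
            simp only [ne_eq, List.all_eq_true, not_forall]
            refine ⟨m, ?_, by simp [hbm]⟩
            rw [PySem.List.mem_pyRange_one]
            omega
      show pvLoopB profile caps duration demands lb (s :: pvDesc (s - 1) n) nb
          = pvLoopA profile caps duration demands lb (s :: pvDesc (s - 1) n)
      rw [pvLoopB, pvLoopA, hfit]
      by_cases hf : pvFits profile caps s duration demands = true
      · rw [if_pos hf, if_pos hf]
      · rw [if_neg hf, if_neg hf]
        exact ih (s - 1) (pvStep profile caps demands nb s) (by omega) (by simpa using hnear)

-- ===== VERDICT (by name: the statement is the Claim_ definition above) =====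
theorem latest_feasible_start_py_spec : Claim_equal_latest_feasible_start_py := by
  intro profile caps duration demands lb ub _ hpre
  unfold Spec_latest_feasible_start_py
  unfold latest_feasible_start_py latest_feasible_start_py_alt
  by_cases hz : duration = 0
  · rw [if_pos hz, if_pos hz]
  · rw [if_neg hz, if_neg hz]
    by_cases hul : ub < lb
    · rw [if_pos hul]
      have : PySem.List.pyRange ub (lb - 1) (-1) = [] :=
        PySem.List.pyRange_neg_one_eq_nil (by omega)
      rw [this, pvLoopA]
    · rw [if_neg hul]
      rcases hpre with hz' | hul' | ⟨hneg, _⟩ | ⟨hdur, _⟩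
      · exact absurd hz' hz
      · exact absurd hul' hul
      · -- duration < 0: A's window is empty (vacuously fits) and B accepts ub at once
        have hinit : PySem.List.pyRange (ub + duration - 1) ub (-1) = [] :=
          PySem.List.pyRange_neg_one_eq_nil (by omega)
        have hcons : PySem.List.pyRange ub (lb - 1) (-1)
            = ub :: PySem.List.pyRange (ub - 1) (lb - 1) (-1) :=
          PySem.List.pyRange_neg_one_cons (by omega)
        rw [hinit, hcons, List.foldl_nil, pvLoopA, pvLoopB]
        have hfits : pvFits profile caps ub duration demands = true := by
          rw [pvFits_eq_all, PySem.List.pyRange_one_eq_nil (by omega)]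
          rfl
        rw [hfits, if_pos rfl]
        unfold pvStep
        by_cases hb : pvBlocked profile caps demands ub = true
        · rw [if_pos hb]
          simp only [decide_eq_true_eq]
          rw [if_pos (by omega)]
        · rw [if_neg hb]
          rw [if_pos rfl]
      -- initial sweep establishes pvNear on (ub, ub+duration)
      have hinit : pvNear profile caps demands (ub + 1) (ub + duration)
          ((PySem.List.pyRange (ub + duration - 1) ub (-1)).foldl
            (pvStep profile caps demands) none) := by
        have hrw := pvDesc_eq_pyRange (duration - 1).toNat (ub + duration - 1)
        have hn : (ub + duration - 1) - ((duration - 1).toNat : Int) = ub := by omega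
        rw [hn] at hrw
        rw [hrw]
        have h0 : pvNear profile caps demands (ub + duration - 1 + 1) (ub + duration) none :=
          Or.inl ⟨rfl, fun t h1 h2 => absurd (lt_of_le_of_lt h1 h2) (by omega)⟩
        have := pvNear_fold profile caps demands (ub + duration) (duration - 1).toNat
          (ub + duration - 1) none (by omega) h0
        have he : ub + duration - 1 + 1 - (((duration - 1).toNat : Nat) : Int) = ub + 1 := by
          omega
        rwa [he] at this
      have hlist : PySem.List.pyRange ub (lb - 1) (-1) = pvDesc ub (ub - lb + 1).toNat := by
        have h := pvDesc_eq_pyRange (ub - lb + 1).toNat ub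
        have hn : ub - ((ub - lb + 1).toNat : Int) = lb - 1 := by omega
        rw [hn] at h
        exact h
      rw [hlist]
      exact (pvLoop_eq profile caps duration demands lb (ub + duration) hdur
        (ub - lb + 1).toNat ub _ (by omega) hinit).symm
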